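-- pv_equiv track=rewrite | github.com/qquartsco-svg/cookiie_brain | solar/day7/runner.py | _make_linear_neighbors
-- ===== SOURCE A (Python) =====
-- from typing import Any, Dict, List, Optional
--
-- def _make_linear_neighbors(n: int) -> List[List[int]]:
--     """선형 체인 이웃 (밴드 i → i±1)."""
--     neighbors = []
--     for i in range(n):
--         nb = []
--         if i > 0:
--             nb.append(i - 1)
--         if i < n - 1:
--             nb.append(i + 1)
--         neighbors.append(nb)
--     return neighbors
-- ===== SOURCE B (Python) =====
-- def _make_linear_neighbors(n: int):
--     """Closed-form segmented construction: endpoints are written directly,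
--     the interior rows come from one guard-free comprehension."""
--     if n <= 0:
--         return []
--     if n == 1:
--         return [[]]
--     return [[1]] + [[i - 1, i + 1] for i in range(1, n - 1)] + [[n - 2]]
-- ===== Notes on version B (the rewrite author's own statement) =====
-- stated objective: alternative
-- what changed: B replaces A's single node loop with per-node boundary conditionals by a closed-form segmented construction: the two endpoint rows are written as literals and only the guard-free interior comprehension iterates, with the degenerate small sizes handled by early returns.
import Mathlib
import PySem

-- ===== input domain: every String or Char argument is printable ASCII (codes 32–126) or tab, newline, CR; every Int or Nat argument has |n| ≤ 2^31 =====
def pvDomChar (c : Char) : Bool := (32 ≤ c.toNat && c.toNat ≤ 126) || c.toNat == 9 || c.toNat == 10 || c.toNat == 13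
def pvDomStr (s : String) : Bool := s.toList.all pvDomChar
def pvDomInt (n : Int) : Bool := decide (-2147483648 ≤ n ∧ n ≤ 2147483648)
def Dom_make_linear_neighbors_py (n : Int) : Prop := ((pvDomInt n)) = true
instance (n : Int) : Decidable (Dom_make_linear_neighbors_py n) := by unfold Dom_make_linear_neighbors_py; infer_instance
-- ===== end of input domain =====

-- B builds the result as three closed-form segments (literal endpoint rows + one
-- guard-free interior comprehension) instead of A's per-node loop with boundary tests.


-- ===== PORT A =====
def make_linear_neighbors_py (n : Int) : List (List Int) :=
  (PySem.List.pyRange 0 n 1).foldl (fun neighbors i =>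
    let nb : List Int := []
    let nb := if i > 0 then nb ++ [i - 1] else nb
    let nb := if i < n - 1 then nb ++ [i + 1] else nb
    neighbors ++ [nb]) []

-- ===== PORT B =====
def make_linear_neighbors_py_alt (n : Int) : List (List Int) :=
  if n ≤ 0 then []
  else if n = 1 then [[]]
  else [[1]] ++ (PySem.List.pyRange 1 (n - 1) 1).map (fun i => [i - 1, i + 1]) ++ [[n - 2]]

-- ===== PRECONDITION & SPEC =====
def Spec_make_linear_neighbors_py (n : Int) (out : List (List Int)) : Prop := out = make_linear_neighbors_py_alt n
instance (n : Int) (out : List (List Int)) : Decidable (Spec_make_linear_neighbors_py n out) := by unfold Spec_make_linear_neighbors_py; infer_instance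

-- ===== CLAIM (what is proved, stated in full; the proofs are below) =====
def Claim_equal_make_linear_neighbors_py : Prop := ∀ (n : Int), Dom_make_linear_neighbors_py n → Spec_make_linear_neighbors_py n (make_linear_neighbors_py n)

-- ===== LEMMAS AND PROOFS =====

-- the row node i gets in A
def pvRowI (n i : Int) : List Int :=
  (if i > 0 then [i - 1] else []) ++ (if i < n - 1 then [i + 1] else [])

lemma pvA_eq_map (n : Int) :
    make_linear_neighbors_py n = (PySem.List.pyRange 0 n 1).map (pvRowI n) := by
  unfold make_linear_neighbors_py
  rw [PySem.List.foldl_append_singleton_eq_map]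
  simp only [List.nil_append]
  refine congrArg (List.map · _) (funext fun i => ?_)
  unfold pvRowI
  split_ifs <;> simp

-- ===== VERDICT (by name: the statement is the Claim_ definition above) =====
theorem make_linear_neighbors_py_spec : Claim_equal_make_linear_neighbors_py := by
  intro n _
  show make_linear_neighbors_py n = make_linear_neighbors_py_alt n
  rw [pvA_eq_map]
  unfold make_linear_neighbors_py_alt
  by_cases h0 : n ≤ 0
  · rw [if_pos h0, PySem.List.pyRange_one_eq_nil (by omega)]; rfl
  · rw [if_neg h0]
    by_cases h1 : n = 1
    · subst h1
      rw [if_pos rfl, PySem.List.pyRange_one_cons (by norm_num),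
          PySem.List.pyRange_one_eq_nil (by norm_num)]
      simp [pvRowI]
    · rw [if_neg h1]
      have h2 : 2 ≤ n := by omega
      rw [PySem.List.pyRange_one_append 0 1 n (by omega) (by omega),
          PySem.List.pyRange_one_append 1 (n - 1) n (by omega) (by omega)]
      have htail : PySem.List.pyRange (n - 1) n 1 = [n - 1] := by
        rw [PySem.List.pyRange_one_cons (by omega), PySem.List.pyRange_one_eq_nil (by omega)]
      rw [show PySem.List.pyRange 0 1 1 = [0] from by decide, htail]
      simp only [List.map_append, List.map_cons, List.map_nil, List.append_assoc]
      congr 1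
      · simp [pvRowI, show (1 : Int) < n by omega]
      congr 1
      · refine List.map_congr_left fun i hi => ?_
        rw [PySem.List.mem_pyRange_one] at hi
        simp [pvRowI, show i > 0 by omega, show i < n - 1 by omega]
      · simp [pvRowI, show (1 : Int) < n by omega]
        ring_nf
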